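-- pv_equiv track=rewrite | github.com/thepratholic/Competitive-Programming | LeetCode/Biweekly Contest 174/Number of Alternating XOR Partitions.py | alternatingXOR
-- ===== SOURCE A (Python) =====
-- from collections import defaultdict
-- from typing import List
--
-- def alternatingXOR(nums: List[int], target1: int, target2: int) -> int:
--     n = len(nums)
--     MOD = (10 ** 9) + 7
--
--     mp1 = defaultdict(int)
--     mp2 = defaultdict(int)
--     mp2[0] += 1
--     xr = 0
--     ans = 0
--
--     for i in range(n):
--         xr ^= nums[i]
--
--         end_t1 = mp2[xr ^ target1]
--         end_t2 = mp1[xr ^ target2]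
--
--         mp1[xr] = (mp1[xr] + end_t1) % MOD
--         mp2[xr] = (mp2[xr] + end_t2) % MOD
--
--         if i == n - 1:
--             ans = (end_t1 + end_t2) % MOD
--
--     return ans
-- ===== SOURCE B (Python) =====
-- from typing import List
--
-- def alternatingXOR(nums: List[int], target1: int, target2: int) -> int:
--     n = len(nums)
--     if n == 0:
--         return 0
--     MOD = (10 ** 9) + 7
--     # boundary DP: dp1[i]/dp2[i] = number of alternating partitions of nums[:i]
--     # whose last segment XORs to target1/target2 (dp2[0] = 1 for the empty prefix)
--     dp1 = [0]
--     dp2 = [1]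
--     for i in range(1, n + 1):
--         seg = 0
--         a = 0
--         b = 0
--         for j in range(i - 1, -1, -1):
--             seg ^= nums[j]
--             if seg == target1:
--                 a = (a + dp2[j]) % MOD
--             if seg == target2:
--                 b = (b + dp1[j]) % MOD
--         dp1.append(a)
--         dp2.append(b)
--     return (dp1[n] + dp2[n]) % MOD
-- ===== Notes on version B (the rewrite author's own statement) =====
-- stated objective: alternative
-- what changed: Replaces the single-pass prefix-XOR hashmap (counts indexed by prefix XOR value) with an explicit O(n^2) boundary DP: dp1[i]/dp2[i] count alternating partitions of nums[:i] ending in a target1/target2 segment, computed by a backward scan accumulating each segment's XOR.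
import Mathlib
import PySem

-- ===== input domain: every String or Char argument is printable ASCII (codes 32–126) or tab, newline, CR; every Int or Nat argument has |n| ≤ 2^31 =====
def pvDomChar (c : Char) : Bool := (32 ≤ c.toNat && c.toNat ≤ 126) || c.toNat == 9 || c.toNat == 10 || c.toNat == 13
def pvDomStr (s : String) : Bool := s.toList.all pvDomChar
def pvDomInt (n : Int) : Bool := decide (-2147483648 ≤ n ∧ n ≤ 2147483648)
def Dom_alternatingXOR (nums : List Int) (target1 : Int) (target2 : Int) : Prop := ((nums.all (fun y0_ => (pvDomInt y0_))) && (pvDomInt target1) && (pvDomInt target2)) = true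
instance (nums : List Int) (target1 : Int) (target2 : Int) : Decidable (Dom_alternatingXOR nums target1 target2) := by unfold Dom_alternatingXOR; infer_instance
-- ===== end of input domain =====

-- B replaces A's single-pass prefix-XOR hashmap with an explicit O(n^2) boundary DP
-- (dp1[i]/dp2[i] = alternating partitions of nums[:i] ending in a target1/target2 segment).

-- ===== PORT A =====
-- loop body of A's 'for i in range(n)': state (mp1, mp2, xr, ans); MOD = 10**9 + 7 = 1000000007
def pvStepA (nums : List Int) (target1 target2 n : Int)
    (st : PySem.Dict Int Int × PySem.Dict Int Int × Int × Int) (i : Int) :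
    PySem.Dict Int Int × PySem.Dict Int Int × Int × Int :=
  let mp1 := st.1
  let mp2 := st.2.1
  let xr := PySem.Int.bxor st.2.2.1 (PySem.List.pyGetD nums i 0)   -- xr ^= nums[i]
  let end_t1 := mp2.getD (PySem.Int.bxor xr target1) 0             -- end_t1 = mp2[xr ^ target1]
  let end_t2 := mp1.getD (PySem.Int.bxor xr target2) 0             -- end_t2 = mp1[xr ^ target2]
  let mp1' := mp1.insert xr (PySem.Int.mod (mp1.getD xr 0 + end_t1) 1000000007)
  let mp2' := mp2.insert xr (PySem.Int.mod (mp2.getD xr 0 + end_t2) 1000000007)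
  let ans' := if i = n - 1 then PySem.Int.mod (end_t1 + end_t2) 1000000007 else st.2.2.2
  (mp1', mp2', xr, ans')

def alternatingXOR (nums : List Int) (target1 : Int) (target2 : Int) : Int :=
  let n := PySem.List.len nums
  -- mp1 = defaultdict(int); mp2 = defaultdict(int); mp2[0] += 1; xr = 0; ans = 0
  let init : PySem.Dict Int Int × PySem.Dict Int Int × Int × Int :=
    (PySem.Dict.empty, (PySem.Dict.empty : PySem.Dict Int Int).modify 0 0 (· + 1), 0, 0)
  ((PySem.List.pyRange 0 n 1).foldl (pvStepA nums target1 target2 n) init).2.2.2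

-- ===== PORT B =====
-- body of B's inner 'for j in range(i - 1, -1, -1)': state (seg, a, b)
def pvInnerB (nums : List Int) (target1 target2 : Int) (dp1 dp2 : List Int)
    (s : Int × Int × Int) (j : Int) : Int × Int × Int :=
  let seg := PySem.Int.bxor s.1 (PySem.List.pyGetD nums j 0)       -- seg ^= nums[j]
  let a := if seg = target1 then PySem.Int.mod (s.2.1 + PySem.List.pyGetD dp2 j 0) 1000000007 else s.2.1
  let b := if seg = target2 then PySem.Int.mod (s.2.2 + PySem.List.pyGetD dp1 j 0) 1000000007 else s.2.2
  (seg, a, b)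

-- body of B's outer 'for i in range(1, n + 1)': state (dp1, dp2); dpK.append(…)
def pvStepB (nums : List Int) (target1 target2 : Int)
    (st : List Int × List Int) (i : Int) : List Int × List Int :=
  let r := (PySem.List.pyRange (i - 1) (-1) (-1)).foldl (pvInnerB nums target1 target2 st.1 st.2) (0, 0, 0)
  (st.1 ++ [r.2.1], st.2 ++ [r.2.2])

def alternatingXOR_alt (nums : List Int) (target1 : Int) (target2 : Int) : Int :=
  let n := PySem.List.len nums
  if n = 0 then 0
  else
    let st := (PySem.List.pyRange 1 (n + 1) 1).foldl (pvStepB nums target1 target2) ([0], [1])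
    PySem.Int.mod (PySem.List.pyGetD st.1 n 0 + PySem.List.pyGetD st.2 n 0) 1000000007

-- ===== PRECONDITION & SPEC =====
def Spec_alternatingXOR (nums : List Int) (target1 : Int) (target2 : Int) (out : Int) : Prop := out = alternatingXOR_alt nums target1 target2
instance (nums : List Int) (target1 : Int) (target2 : Int) (out : Int) : Decidable (Spec_alternatingXOR nums target1 target2 out) := by unfold Spec_alternatingXOR; infer_instance

-- ===== CLAIM (what is proved, stated in full; the proofs are below) =====
def Claim_equal_alternatingXOR : Prop := ∀ (nums : List Int) (target1 : Int) (target2 : Int), Dom_alternatingXOR nums target1 target2 → Spec_alternatingXOR nums target1 target2 (alternatingXOR nums target1 target2)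

-- ===== LEMMAS AND PROOFS =====

-- ---- XOR group facts for PySem.Int.bxor (via the sign/magnitude encoding) ----
def pvE (a : Int) : Bool × Nat := (decide (a < 0), if 0 ≤ a then a.toNat else (-a - 1).toNat)

theorem pvE_inj {a b : Int} (h : pvE a = pvE b) : a = b := by
  unfold pvE at h
  rw [Prod.mk.injEq] at h
  obtain ⟨h1, h2⟩ := h
  rw [decide_eq_decide] at h1
  split_ifs at h2 <;> omega

theorem pvE_bxor (a b : Int) :
    pvE (PySem.Int.bxor a b) = (xor (pvE a).1 (pvE b).1, (pvE a).2 ^^^ (pvE b).2) := by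
  unfold pvE PySem.Int.bxor
  by_cases ha : 0 ≤ a <;> by_cases hb : 0 ≤ b <;>
    simp only [ha, hb, if_true, if_false] <;> rw [Prod.mk.injEq] <;> constructor <;>
    first
      | (split_ifs <;> omega)
      | (simp [show ¬ (a < 0) from by omega, show ¬ (b < 0) from by omega])
      | (simp [show ¬ (a < 0) from by omega, show (b < 0) from by omega] <;> omega)
      | (simp [show (a < 0) from by omega, show ¬ (b < 0) from by omega] <;> omega)
      | (simp [show (a < 0) from by omega, show (b < 0) from by omega])

theorem pv_bxor_assoc (a b c : Int) :
    PySem.Int.bxor (PySem.Int.bxor a b) c = PySem.Int.bxor a (PySem.Int.bxor b c) := by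
  apply pvE_inj
  simp [pvE_bxor, Nat.xor_assoc]

theorem pv_zero_bxor (a : Int) : PySem.Int.bxor 0 a = a := by
  rw [PySem.Int.bxor_comm]; exact PySem.Int.bxor_zero a

theorem pv_bxor_cancel (x y : Int) : PySem.Int.bxor x (PySem.Int.bxor x y) = y := by
  rw [← pv_bxor_assoc, PySem.Int.bxor_self, pv_zero_bxor]

theorem pv_bxor_eq_iff (p q t : Int) : p = PySem.Int.bxor q t ↔ PySem.Int.bxor p q = t := by
  constructor
  · rintro rfl
    rw [PySem.Int.bxor_comm, pv_bxor_cancel]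
  · rintro rfl
    rw [PySem.Int.bxor_comm p q, pv_bxor_cancel]

-- ---- modular arithmetic (M = 1000000007) ----
theorem pv_mod_add_left (s v : Int) :
    PySem.Int.mod (PySem.Int.mod s 1000000007 + v) 1000000007 = PySem.Int.mod (s + v) 1000000007 := by
  rw [PySem.Int.mod_eq_emod_of_pos (by norm_num), PySem.Int.mod_eq_emod_of_pos (by norm_num),
      PySem.Int.mod_eq_emod_of_pos (by norm_num)]
  exact Int.emod_add_emod s 1000000007 v

theorem pv_mod_zero : PySem.Int.mod 0 1000000007 = 0 := by decide

theorem pv_mod_one : PySem.Int.mod 1 1000000007 = 1 := by decide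

-- ---- prefix XOR ----
def pfx (nums : List Int) (j : Nat) : Int := (nums.take j).foldl PySem.Int.bxor 0

theorem pfx_zero (nums : List Int) : pfx nums 0 = 0 := rfl

theorem pfx_succ (nums : List Int) (m : Nat) (h : m < nums.length) :
    pfx nums (m + 1) = PySem.Int.bxor (pfx nums m) (nums.getD m 0) := by
  unfold pfx
  rw [List.take_add_one, List.getElem?_eq_getElem h, List.getD_eq_getElem _ _ h,
      Option.toList_some, List.foldl_append, List.foldl_cons, List.foldl_nil]

-- ---- the common DP table: row i = (d1 i, d2 i) ----
def pvRow (nums : List Int) (target1 target2 : Int) (L : List (Int × Int)) (i : Nat) : Int × Int :=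
  (PySem.Int.mod (((List.range i).map (fun j =>
      if PySem.Int.bxor (pfx nums j) (pfx nums i) = target1 then (L.getD j (0, 0)).2 else 0)).sum) 1000000007,
   PySem.Int.mod (((List.range i).map (fun j =>
      if PySem.Int.bxor (pfx nums j) (pfx nums i) = target2 then (L.getD j (0, 0)).1 else 0)).sum) 1000000007)

def pvTab (nums : List Int) (target1 target2 : Int) : Nat → List (Int × Int)
  | 0 => [(0, 1)]
  | i + 1 =>
    let L := pvTab nums target1 target2 i
    L ++ [pvRow nums target1 target2 L (i + 1)]

def pvD (nums : List Int) (target1 target2 : Int) (j : Nat) : Int × Int :=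
  (pvTab nums target1 target2 j).getD j (0, 0)

theorem pvTab_length (nums : List Int) (target1 target2 : Int) (i : Nat) :
    (pvTab nums target1 target2 i).length = i + 1 := by
  induction i with
  | zero => rfl
  | succ i ih => simp [pvTab, ih]

theorem pvTab_getD (nums : List Int) (target1 target2 : Int) (i j : Nat) (h : j ≤ i) :
    (pvTab nums target1 target2 i).getD j (0, 0) = pvD nums target1 target2 j := by
  induction i with
  | zero => interval_cases j; rfl
  | succ i ih =>
    rcases Nat.lt_or_ge j (i + 1) with hj | hj
    · rw [← ih (by omega)]
      simp only [pvTab]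
      rw [List.getD_append _ _ _ _ (by rw [pvTab_length]; omega)]
    · have hj' : j = i + 1 := by omega
      subst hj'
      rfl

theorem pvD_zero (nums : List Int) (target1 target2 : Int) : pvD nums target1 target2 0 = (0, 1) := rfl

theorem pvD_succ (nums : List Int) (target1 target2 : Int) (i : Nat) :
    pvD nums target1 target2 (i + 1) =
      (PySem.Int.mod (((List.range (i + 1)).map (fun j =>
          if PySem.Int.bxor (pfx nums j) (pfx nums (i + 1)) = target1 then (pvD nums target1 target2 j).2 else 0)).sum) 1000000007,
       PySem.Int.mod (((List.range (i + 1)).map (fun j =>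
          if PySem.Int.bxor (pfx nums j) (pfx nums (i + 1)) = target2 then (pvD nums target1 target2 j).1 else 0)).sum) 1000000007) := by
  have h0 : pvD nums target1 target2 (i + 1) =
      pvRow nums target1 target2 (pvTab nums target1 target2 i) (i + 1) := by
    unfold pvD
    simp only [pvTab]
    rw [List.getD_eq_getElem _ _ (by simp [pvTab_length])]
    rw [List.getElem_append_right (by simp [pvTab_length])]
    simp [pvTab_length]
  rw [h0]
  unfold pvRow
  have hcg : ∀ (t : Int) (g : Nat → Int × Int → Int),
      ((List.range (i + 1)).map (fun j =>
        if PySem.Int.bxor (pfx nums j) (pfx nums (i + 1)) = t then g j ((pvTab nums target1 target2 i).getD j (0, 0)) else 0))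
      = ((List.range (i + 1)).map (fun j =>
        if PySem.Int.bxor (pfx nums j) (pfx nums (i + 1)) = t then g j (pvD nums target1 target2 j) else 0)) := by
    intro t g
    apply List.map_congr_left
    intro j hj
    rw [pvTab_getD nums target1 target2 i j (by simp at hj; omega)]
  rw [Prod.mk.injEq]
  constructor
  · exact congrArg (fun s => PySem.Int.mod s 1000000007) (congrArg List.sum (hcg target1 (fun _ p => p.2)))
  · exact congrArg (fun s => PySem.Int.mod s 1000000007) (congrArg List.sum (hcg target2 (fun _ p => p.1)))

theorem pv_bxor_swap (p v q : Int) :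
    PySem.Int.bxor (PySem.Int.bxor (PySem.Int.bxor p v) q) v = PySem.Int.bxor p q := by
  calc PySem.Int.bxor (PySem.Int.bxor (PySem.Int.bxor p v) q) v
      = PySem.Int.bxor (PySem.Int.bxor p v) (PySem.Int.bxor q v) := pv_bxor_assoc _ _ _
    _ = PySem.Int.bxor p (PySem.Int.bxor v (PySem.Int.bxor q v)) := pv_bxor_assoc _ _ _
    _ = PySem.Int.bxor p (PySem.Int.bxor v (PySem.Int.bxor v q)) := by rw [PySem.Int.bxor_comm q v]
    _ = PySem.Int.bxor p q := by rw [pv_bxor_cancel]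

-- ===== A-side loop invariant =====

def pvStA (nums : List Int) (target1 target2 : Int) (k : Nat) :
    PySem.Dict Int Int × PySem.Dict Int Int × Int × Int :=
  (PySem.List.pyRange 0 (k : Int) 1).foldl
    (pvStepA nums target1 target2 (PySem.List.len nums))
    (PySem.Dict.empty, (PySem.Dict.empty : PySem.Dict Int Int).modify 0 0 (· + 1), 0, 0)

theorem pvA_loop (nums : List Int) (target1 target2 : Int) (k : Nat) (hk : k ≤ nums.length) :
    (pvStA nums target1 target2 k).2.2.1 = pfx nums k ∧
    (∀ x : Int, (pvStA nums target1 target2 k).1.getD x 0 =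
      PySem.Int.mod (((List.range (k + 1)).map (fun j =>
        if pfx nums j = x then (pvD nums target1 target2 j).1 else 0)).sum) 1000000007) ∧
    (∀ x : Int, (pvStA nums target1 target2 k).2.1.getD x 0 =
      PySem.Int.mod (((List.range (k + 1)).map (fun j =>
        if pfx nums j = x then (pvD nums target1 target2 j).2 else 0)).sum) 1000000007) ∧
    (pvStA nums target1 target2 k).2.2.2 = (if k = nums.length ∧ 0 < nums.length then
        PySem.Int.mod ((pvD nums target1 target2 nums.length).1 +
          (pvD nums target1 target2 nums.length).2) 1000000007
      else 0) := by
  induction k with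
  | zero =>
    have h0 : pvStA nums target1 target2 0 =
        (PySem.Dict.empty, (PySem.Dict.empty : PySem.Dict Int Int).modify 0 0 (· + 1), 0, 0) := by
      unfold pvStA
      rw [Nat.cast_zero, PySem.List.pyRange_one_eq_nil (by norm_num), List.foldl_nil]
    rw [h0]
    refine ⟨rfl, ?_, ?_, ?_⟩
    · intro x
      simp [pfx_zero, pvD_zero]
    · intro x
      rw [PySem.Dict.getD_modify, PySem.Dict.getD_empty]
      simp only [Nat.zero_add, List.range_one, List.map_singleton, List.sum_singleton, pfx_zero,
        pvD_zero]
      by_cases hx : x = (0 : Int)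
      · rw [if_pos hx, if_pos hx.symm]
        exact pv_mod_one.symm
      · rw [if_neg hx, if_neg (fun h => hx h.symm)]
        exact pv_mod_zero.symm
    · split_ifs with h
      · omega
      · rfl
  | succ k ih =>
    have hk' : k < nums.length := by omega
    obtain ⟨hxr, hm1, hm2, hans⟩ := ih (by omega)
    have hun : pvStA nums target1 target2 (k + 1) =
        pvStepA nums target1 target2 (PySem.List.len nums) (pvStA nums target1 target2 k) (k : Int) := by
      unfold pvStA
      rw [show ((k + 1 : Nat) : Int) = (k : Int) + 1 by push_cast; ring,
          PySem.List.pyRange_one_succ_right (by omega), List.foldl_append, List.foldl_cons,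
          List.foldl_nil]
    have hxr' : PySem.Int.bxor (pvStA nums target1 target2 k).2.2.1 (PySem.List.pyGetD nums (k : Int) 0)
        = pfx nums (k + 1) := by
      rw [hxr, PySem.List.pyGetD_natCast, ← pfx_succ nums k hk']
    have hcond : ∀ (t : Int) (g : Nat → Int),
        ((List.range (k + 1)).map (fun j =>
          if pfx nums j = PySem.Int.bxor (pfx nums (k + 1)) t then g j else 0)).sum
        = ((List.range (k + 1)).map (fun j =>
          if PySem.Int.bxor (pfx nums j) (pfx nums (k + 1)) = t then g j else 0)).sum := by
      intro t g
      apply congrArg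
      apply List.map_congr_left
      intro j _
      exact if_congr (pv_bxor_eq_iff _ _ _) rfl rfl
    have hend1 : (pvStA nums target1 target2 k).2.1.getD
        (PySem.Int.bxor (pfx nums (k + 1)) target1) 0 = (pvD nums target1 target2 (k + 1)).1 := by
      rw [hm2, pvD_succ, hcond]
    have hend2 : (pvStA nums target1 target2 k).1.getD
        (PySem.Int.bxor (pfx nums (k + 1)) target2) 0 = (pvD nums target1 target2 (k + 1)).2 := by
      rw [hm1, pvD_succ, hcond]
    rw [hun]
    simp only [pvStepA, hxr', hend1, hend2]
    refine ⟨trivial, ?_, ?_, ?_⟩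
    · intro x
      rw [PySem.Dict.getD_insert, List.range_succ (n := k + 1), List.map_append,
          List.sum_append, List.map_singleton, List.sum_singleton]
      by_cases hx : x = pfx nums (k + 1)
      · rw [if_pos hx, hm1, pv_mod_add_left, hx, if_pos rfl]
      · rw [if_neg hx, hm1, if_neg (fun h => hx h.symm), add_zero]
    · intro x
      rw [PySem.Dict.getD_insert, List.range_succ (n := k + 1), List.map_append,
          List.sum_append, List.map_singleton, List.sum_singleton]
      by_cases hx : x = pfx nums (k + 1)
      · rw [if_pos hx, hm2, pv_mod_add_left, hx, if_pos rfl]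
      · rw [if_neg hx, hm2, if_neg (fun h => hx h.symm), add_zero]
    · rw [PySem.List.len_eq]
      by_cases hl : (k : Int) = (nums.length : Int) - 1
      · have hlen : k + 1 = nums.length := by omega
        rw [if_pos hl, if_pos (by omega), hlen]
      · rw [if_neg hl, hans, if_neg (by omega), if_neg (by omega)]

-- ===== B-side lemmas =====

theorem pvB_inner (nums : List Int) (target1 target2 : Int) (dp1 dp2 : List Int) (i : Nat)
    (hi : i ≤ nums.length)
    (h1 : ∀ j, j < i → dp1.getD j 0 = (pvD nums target1 target2 j).1)
    (h2 : ∀ j, j < i → dp2.getD j 0 = (pvD nums target1 target2 j).2)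
    (k : Nat) (hk : k ≤ i) (sa sb : Int) :
    (PySem.List.pyRange ((k : Int) - 1) (-1) (-1)).foldl (pvInnerB nums target1 target2 dp1 dp2)
        (PySem.Int.bxor (pfx nums k) (pfx nums i), PySem.Int.mod sa 1000000007, PySem.Int.mod sb 1000000007)
      = (pfx nums i,
         PySem.Int.mod (sa + ((List.range k).map (fun j =>
             if PySem.Int.bxor (pfx nums j) (pfx nums i) = target1 then (pvD nums target1 target2 j).2 else 0)).sum) 1000000007,
         PySem.Int.mod (sb + ((List.range k).map (fun j =>
             if PySem.Int.bxor (pfx nums j) (pfx nums i) = target2 then (pvD nums target1 target2 j).1 else 0)).sum) 1000000007) := by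
  induction k generalizing sa sb with
  | zero =>
    rw [show ((0:Nat):Int) - 1 = -1 by norm_num, PySem.List.pyRange_neg_one_eq_nil (by norm_num),
        List.foldl_nil, pfx_zero, pv_zero_bxor]
    simp
  | succ k ih =>
    have hk' : k < i := by omega
    have hklen : k < nums.length := by omega
    rw [show ((k+1:Nat):Int) - 1 = (k:Int) by push_cast; ring,
        PySem.List.pyRange_neg_one_cons (by omega), List.foldl_cons]
    have hseg : PySem.Int.bxor (PySem.Int.bxor (pfx nums (k+1)) (pfx nums i)) (nums.getD k 0)
        = PySem.Int.bxor (pfx nums k) (pfx nums i) := by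
      rw [pfx_succ nums k hklen]
      exact pv_bxor_swap _ _ _
    have hstep : pvInnerB nums target1 target2 dp1 dp2
        (PySem.Int.bxor (pfx nums (k+1)) (pfx nums i),
         PySem.Int.mod sa 1000000007, PySem.Int.mod sb 1000000007) (k:Int)
      = (PySem.Int.bxor (pfx nums k) (pfx nums i),
         PySem.Int.mod (sa + (if PySem.Int.bxor (pfx nums k) (pfx nums i) = target1 then (pvD nums target1 target2 k).2 else 0)) 1000000007,
         PySem.Int.mod (sb + (if PySem.Int.bxor (pfx nums k) (pfx nums i) = target2 then (pvD nums target1 target2 k).1 else 0)) 1000000007) := by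
      simp only [pvInnerB, PySem.List.pyGetD_natCast]
      rw [hseg, h2 k hk', h1 k hk']
      split_ifs <;>
        (rw [Prod.mk.injEq, Prod.mk.injEq]
         refine ⟨rfl, ?_, ?_⟩ <;> first | rw [pv_mod_add_left] | rw [add_zero])
    rw [hstep, ih (by omega) _ _]
    simp only [List.range_succ, List.map_append, List.sum_append, List.map_singleton,
        List.sum_singleton, Prod.mk.injEq]
    refine ⟨trivial, ?_, ?_⟩ <;> (congr 1; ring)

theorem pvB_loop (nums : List Int) (target1 target2 : Int) (i : Nat) (hi : i ≤ nums.length) :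
    (PySem.List.pyRange 1 ((i : Int) + 1) 1).foldl (pvStepB nums target1 target2) ([0], [1])
      = ((List.range (i + 1)).map (fun j => (pvD nums target1 target2 j).1),
         (List.range (i + 1)).map (fun j => (pvD nums target1 target2 j).2)) := by
  induction i with
  | zero =>
    rw [show ((0:Nat):Int) + 1 = 1 by norm_num, PySem.List.pyRange_one_eq_nil (by norm_num),
        List.foldl_nil]
    simp [pvD_zero]
  | succ i ih =>
    rw [show ((i+1:Nat):Int) + 1 = ((i:Int) + 1) + 1 by push_cast; ring,
        PySem.List.pyRange_one_succ_right (by omega), List.foldl_append, List.foldl_cons,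
        List.foldl_nil, ih (by omega)]
    simp only [pvStepB]
    rw [show ((i:Int) + 1) - 1 = ((i+1:Nat):Int) - 1 by push_cast; ring,
        show ((0,0,0) : Int × Int × Int)
          = (PySem.Int.bxor (pfx nums (i+1)) (pfx nums (i+1)),
             PySem.Int.mod 0 1000000007, PySem.Int.mod 0 1000000007) by
          rw [PySem.Int.bxor_self, pv_mod_zero],
        pvB_inner nums target1 target2 _ _ (i+1) (by omega)
          (fun j hj => PySem.List.getD_map_range _ _ _ _ (by omega))
          (fun j hj => PySem.List.getD_map_range _ _ _ _ (by omega))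
          (i+1) le_rfl 0 0]
    simp only [zero_add]
    rw [Prod.mk.injEq]
    constructor <;>
    · rw [List.range_succ (n := i + 1), List.map_append, List.map_singleton, pvD_succ]

theorem pvA_eq (nums : List Int) (target1 target2 : Int) :
    alternatingXOR nums target1 target2 = (pvStA nums target1 target2 nums.length).2.2.2 := by
  unfold alternatingXOR pvStA
  simp only [PySem.List.len_eq]

-- ===== VERDICT (by name: the statement is the Claim_ definition above) =====
theorem alternatingXOR_spec : Claim_equal_alternatingXOR := by
  intro nums target1 target2 _
  unfold Spec_alternatingXOR
  obtain ⟨-, -, -, hans⟩ := pvA_loop nums target1 target2 nums.length le_rfl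
  rw [pvA_eq, hans]
  unfold alternatingXOR_alt
  simp only [PySem.List.len_eq]
  by_cases h0 : nums.length = 0
  · rw [if_neg (by omega), if_pos (by exact_mod_cast h0)]
  · rw [if_pos (show _ ∧ _ from ⟨by trivial, by omega⟩), if_neg (by exact_mod_cast h0)]
    rw [pvB_loop nums target1 target2 nums.length (le_refl _)]
    rw [PySem.List.pyGetD_natCast, PySem.List.pyGetD_natCast,
        PySem.List.getD_map_range _ _ _ _ (by omega), PySem.List.getD_map_range _ _ _ _ (by omega)]
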